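-- pv_equiv track=rewrite | github.com/ltsKita/indent_check | test3.py | find_majority_numbers
-- ===== SOURCE A (Python) =====
-- from collections import Counter
--
-- def find_majority_numbers(numbers):
--     """
--     全ての番号リストに対して、1つ目、2つ目、3つ目、4つ目の数字のメジャーな値を返す。
--     """
--     majority_values = []
--     for i in range(4):  # 最大で4つ目の数字までチェック
--         digits_at_index = [number[i] for number in numbers if len(number) > i]
--         if digits_at_index:
--             counter = Counter(digits_at_index)
--             majority_value = counter.most_common(1)[0][0]
--             majority_values.append(majority_value)
--         else:
--             majority_values.append(None)  # インデックスに値が存在しない場合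
--     return majority_values
-- ===== SOURCE B (Python) =====
-- def _top(c):
--     return max(c, key=c.get) if c else None
--
-- def find_majority_numbers(numbers):
--     """
--     Single pass over numbers maintaining one plain dict of counts per position
--     (insertion order = first-occurrence order, so ties break like Counter.most_common).
--     """
--     c0, c1, c2, c3 = {}, {}, {}, {}
--     for number in numbers:
--         if len(number) > 0:
--             c0[number[0]] = c0.get(number[0], 0) + 1
--         if len(number) > 1:
--             c1[number[1]] = c1.get(number[1], 0) + 1
--         if len(number) > 2:
--             c2[number[2]] = c2.get(number[2], 0) + 1
--         if len(number) > 3: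
--             c3[number[3]] = c3.get(number[3], 0) + 1
--     return [_top(c0), _top(c1), _top(c2), _top(c3)]
-- ===== Notes on version B (the rewrite author's own statement) =====
-- stated objective: alternative
-- what changed: Replaces four separate filtered scans of the list (each building a Counter and taking most_common) with a single pass that maintains four per-position plain count dicts and then takes max over each dict's keys.
import Mathlib
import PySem

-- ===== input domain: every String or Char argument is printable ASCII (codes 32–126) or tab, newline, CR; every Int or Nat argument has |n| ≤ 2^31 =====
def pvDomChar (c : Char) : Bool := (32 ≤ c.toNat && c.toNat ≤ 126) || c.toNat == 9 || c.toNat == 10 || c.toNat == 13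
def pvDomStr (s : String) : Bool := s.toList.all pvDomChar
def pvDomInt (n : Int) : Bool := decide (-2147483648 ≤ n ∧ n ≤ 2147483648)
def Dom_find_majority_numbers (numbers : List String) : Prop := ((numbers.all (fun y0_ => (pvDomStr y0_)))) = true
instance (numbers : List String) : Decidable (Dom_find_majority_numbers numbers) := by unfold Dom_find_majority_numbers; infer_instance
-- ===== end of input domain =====

-- B makes ONE pass over `numbers` maintaining four per-position count dicts instead of
-- A's four filtered scans each building a Counter (objective: alternative decomposition).
-- Python's 1-character strings number[i] are ported as Char and wrapped with String.mk at the end.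

-- ===== PORT A =====
-- counter.most_common(1)[0][0] is the first item attaining the maximal count
-- (heapq.nlargest is stable), i.e. PySem.List.max? on counter.items keyed by the count.
def find_majority_numbers (numbers : List String) : List (Option String) :=
  (PySem.List.pyRange 0 4 1).foldl (fun majority_values i =>
    let digits_at_index : List Char :=
      numbers.filterMap (fun number =>
        if i < PySem.Str.len number then PySem.Str.pyGet? number i else none)
    majority_values ++
      [if digits_at_index.isEmpty = false then
        (PySem.List.max? (PySem.Dict.counter digits_at_index).items (fun p => p.2)).map
          (fun p => String.mk [p.1])
      else none]) []

-- ===== PORT B =====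
-- c[ch] = c.get(ch, 0) + 1 guarded by len(number) > i  (getD's ' ' default is never used: i < cs.length)
def pvBump (c : PySem.Dict Char Int) (cs : List Char) (i : Nat) : PySem.Dict Char Int :=
  if i < cs.length then c.modify (cs.getD i ' ') 0 (fun v => v + 1) else c

-- max(c, key=c.get) if c else None
def pvTop (c : PySem.Dict Char Int) : Option String :=
  if c.items.isEmpty = false then
    (PySem.List.max? c.keys (fun k => c.getD k 0)).map (fun k => String.mk [k])
  else none

def find_majority_numbers_alt (numbers : List String) : List (Option String) :=
  let st := numbers.foldl (fun st number =>
      (pvBump st.1 number.toList 0, pvBump st.2.1 number.toList 1,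
       pvBump st.2.2.1 number.toList 2, pvBump st.2.2.2 number.toList 3))
    (PySem.Dict.empty, PySem.Dict.empty, PySem.Dict.empty, PySem.Dict.empty)
  [pvTop st.1, pvTop st.2.1, pvTop st.2.2.1, pvTop st.2.2.2]

-- ===== PRECONDITION & SPEC =====
def Spec_find_majority_numbers (numbers : List String) (out : List (Option String)) : Prop := out = find_majority_numbers_alt numbers
instance (numbers : List String) (out : List (Option String)) : Decidable (Spec_find_majority_numbers numbers out) := by unfold Spec_find_majority_numbers; infer_instance

-- ===== CLAIM (what is proved, stated in full; the proofs are below) =====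
def Claim_equal_find_majority_numbers : Prop := ∀ (numbers : List String), Dom_find_majority_numbers numbers → Spec_find_majority_numbers numbers (find_majority_numbers numbers)

-- ===== LEMMAS AND PROOFS =====

-- the characters A collects at position i (Nat form)
def pvDigitsAt (i : Nat) (numbers : List String) : List Char :=
  numbers.filterMap (fun n => if i < n.toList.length then n.toList[i]? else none)

-- B's per-position fold equals the counting fold over A's digit list
theorem pvBump_fold (i : Nat) (numbers : List String) :
    ∀ d : PySem.Dict Char Int,
      numbers.foldl (fun d n => pvBump d n.toList i) d =
        (pvDigitsAt i numbers).foldl (fun d x => d.modify x 0 (fun v => v + 1)) d := by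
  induction numbers with
  | nil => intro d; rfl
  | cons n ns ih =>
    intro d
    rw [List.foldl_cons, ih]
    by_cases h : i < n.toList.length
    · have h' : i < n.length := by simpa using h
      have hd : pvDigitsAt i (n :: ns) = n.toList.getD i ' ' :: pvDigitsAt i ns := by
        simp [pvDigitsAt, h', List.getD_eq_getElem?_getD]
      rw [hd, List.foldl_cons]
      simp [pvBump, h']
    · have h' : ¬ i < n.length := by simpa using h
      have hd : pvDigitsAt i (n :: ns) = pvDigitsAt i ns := by
        simp [pvDigitsAt, h']
      rw [hd]
      simp [pvBump, h']

-- split B's 4-tuple fold into four independent folds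
theorem pvFold_split (numbers : List String)
    (d0 d1 d2 d3 : PySem.Dict Char Int) :
    numbers.foldl (fun st number =>
      (pvBump st.1 number.toList 0, pvBump st.2.1 number.toList 1,
       pvBump st.2.2.1 number.toList 2, pvBump st.2.2.2 number.toList 3)) (d0, d1, d2, d3) =
      (numbers.foldl (fun d n => pvBump d n.toList 0) d0,
       numbers.foldl (fun d n => pvBump d n.toList 1) d1,
       numbers.foldl (fun d n => pvBump d n.toList 2) d2,
       numbers.foldl (fun d n => pvBump d n.toList 3) d3) := by
  induction numbers generalizing d0 d1 d2 d3 with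
  | nil => rfl
  | cons n ns ih => simp [List.foldl_cons, ih]

-- max? over a mapped list
theorem pvMax?_map {α β κ : Type} [LinearOrder κ] (f : α → β) (key : β → κ) :
    ∀ (l : List α) (acc : Option α),
      List.foldl (fun acc x => match acc with
        | none => some x
        | some m => if key m < key x then some x else some m) (acc.map f) (l.map f) =
      (List.foldl (fun acc x => match acc with
        | none => some x
        | some m => if key (f m) < key (f x) then some x else some m) acc l).map f := by
  intro l
  induction l with
  | nil => intro acc; rfl
  | cons x xs ih =>
    intro acc
    cases acc with
    | none => simpa using ih (some x)
    | some m =>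
      simp only [List.map_cons, List.foldl_cons, Option.map_some]
      by_cases h : key (f m) < key (f x)
      · simpa [h] using ih (some x)
      · simpa [h] using ih (some m)

theorem pvMax?_map' {α β κ : Type} [LinearOrder κ] (f : α → β) (key : β → κ) (l : List α) :
    PySem.List.max? (l.map f) key = (PySem.List.max? l (fun x => key (f x))).map f := by
  simpa [PySem.List.max?] using pvMax?_map f key l none

-- the per-position body of A equals pvTop of the counter of its digit list
theorem pvTop_counter (xs : List Char) :
    (if xs.isEmpty = false then
      (PySem.List.max? (PySem.Dict.counter xs).items (fun p => p.2)).map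
        (fun p => String.mk [p.1])
    else none) = pvTop (PySem.Dict.counter xs) := by
  unfold pvTop
  cases xs with
  | nil => rfl
  | cons x l =>
    have hne : (PySem.Dict.counter (x :: l)).items.isEmpty = false := by
      have hx : x ∈ PySem.Set.ofList (x :: l) := (PySem.Set.mem_ofList _ _).2 (by simp)
      simp [PySem.Dict.items_counter]
      intro h
      rw [h] at hx; simp at hx
    rw [hne]
    simp only [List.isEmpty_cons, if_true]
    have hkey : (fun k => (PySem.Dict.counter (x :: l)).getD k 0) =
        (fun k => ((List.count k (x :: l) : Int))) := by
      funext k; exact PySem.Dict.getD_counter (x :: l) k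
    rw [PySem.Dict.items_counter, PySem.Dict.keys_counter, hkey,
      pvMax?_map' (fun k => (k, (List.count k (x :: l) : Int))) (fun p => p.2)]
    simp [Option.map_map, Function.comp_def]

-- ===== VERDICT (by name: the statement is the Claim_ definition above) =====
theorem find_majority_numbers_spec : Claim_equal_find_majority_numbers := by
  intro numbers _
  unfold Spec_find_majority_numbers find_majority_numbers find_majority_numbers_alt
  rw [show PySem.List.pyRange 0 4 1 = [0, 1, 2, 3] from rfl]
  simp only [List.foldl_cons, List.foldl_nil, List.nil_append, List.cons_append]
  rw [pvFold_split]
  simp only [pvBump_fold]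
  have hdig : ∀ i : Nat, i < 4 →
      (numbers.filterMap (fun number =>
        if (i : Int) < PySem.Str.len number then PySem.Str.pyGet? number (i : Int) else none)) =
      pvDigitsAt i numbers := by
    intro i _
    unfold pvDigitsAt
    congr 1; funext n
    have hlen : ((i : Int) < PySem.Str.len n) ↔ i < n.toList.length := by
      simp [PySem.Str.len_eq]
    by_cases h : i < n.toList.length
    · rw [if_pos (hlen.2 h), if_pos h, PySem.Str.pyGet?_natCast]
    · rw [if_neg (fun hh => h (hlen.1 hh)), if_neg h]
  have h0 := hdig 0 (by omega); have h1 := hdig 1 (by omega)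
  have h2 := hdig 2 (by omega); have h3 := hdig 3 (by omega)
  simp only [Nat.cast_ofNat, Nat.cast_zero, Nat.cast_one] at h0 h1 h2 h3
  rw [h0, h1, h2, h3]
  rw [pvTop_counter, pvTop_counter, pvTop_counter, pvTop_counter]
  simp [PySem.Dict.counter_eq_foldl]
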